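-- pv_equiv track=rewrite | github.com/volcengine/verl | atropos/environments/intern_bootcamp/internbootcamp_lib/internbootcamp/bootcamp/dbookshelves/dbookshelves.py | compute_max_beauty
-- ===== SOURCE A (Python) =====
-- def compute_max_beauty(n, k, a):
--     """优化后的正确性验证算法"""
--     prefix = [0] * (n + 1)
--     for i in range(n):
--         prefix[i+1] = prefix[i] + a[i]
--
--     result = 0
--     for bit in reversed(range(61)):
--         mask = result | (1 << bit)
--         dp = [False] * (n + 1)
--         dp[0] = True
--
--         for _ in range(k):
--             new_dp = [False] * (n + 1)
--             for end in range(n+1):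
--                 if not dp[end]: continue
--                 for new_end in range(end+1, n+1):
--                     if (prefix[new_end] - prefix[end]) & mask == mask:
--                         new_dp[new_end] = True
--             dp = new_dp
--
--         if dp[n]:
--             result = mask
--     return result
-- ===== SOURCE B (Python) =====
-- def compute_max_beauty(n, k, a):
--     """Single forward pass per bit: reach[pos] = set of achievable segment
--     counts (capped at k) ending at prefix position pos, instead of A's
--     k rounds of boolean-layer DP."""
--     prefix = [0] * (n + 1)
--     for i in range(n):
--         prefix[i+1] = prefix[i] + a[i]
--
--     result = 0
--     for bit in reversed(range(61)):
--         mask = result | (1 << bit)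
--         reach = [{0}]
--         for pos in range(1, n + 1):
--             cur = set()
--             for start in range(pos):
--                 if (prefix[pos] - prefix[start]) & mask == mask:
--                     for j in reach[start]:
--                         if j < k:
--                             cur.add(j + 1)
--             reach.append(cur)
--         if k in reach[n]:
--             result = mask
--     return result
-- ===== Notes on version B (the rewrite author's own statement) =====
-- stated objective: alternative
-- what changed: Replaces A's per-bit k-round boolean-layer reachability DP (rebuilding an n+1 boolean array k times) by a single left-to-right pass that maintains, for each prefix position, the set of achievable segment counts capped at k, testing membership of k at position n.
-- intended difference: On n = 0 with k < 0 A returns 2**61-1 because its initial dp[0]=True survives zero DP rounds, while B returns 0, the intended value: an empty shelf cannot be split into a negative number of parts. — e.g. on compute_max_beauty(0, -1, []): A returns 2305843009213693951, B returns 0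
import Mathlib
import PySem

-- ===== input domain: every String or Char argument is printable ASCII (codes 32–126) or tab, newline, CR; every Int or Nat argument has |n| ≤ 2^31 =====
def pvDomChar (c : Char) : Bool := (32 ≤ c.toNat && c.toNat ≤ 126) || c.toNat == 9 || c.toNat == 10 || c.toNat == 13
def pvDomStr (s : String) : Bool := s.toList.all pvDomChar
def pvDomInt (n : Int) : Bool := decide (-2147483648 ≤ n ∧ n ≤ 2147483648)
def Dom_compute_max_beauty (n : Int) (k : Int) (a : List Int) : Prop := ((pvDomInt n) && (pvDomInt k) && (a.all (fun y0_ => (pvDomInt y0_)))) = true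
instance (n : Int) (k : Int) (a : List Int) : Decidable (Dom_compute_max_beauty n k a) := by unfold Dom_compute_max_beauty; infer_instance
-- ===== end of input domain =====

-- B replaces A's k rounds of boolean-layer DP per bit by one forward pass keeping,
-- per prefix position, the set of achievable segment counts (capped at k); alternative
-- decomposition, return value only (A mutates no argument).

-- ===== PORT A =====
-- prefix-sum loop shared verbatim by both Pythons: Python fills slots 1..n of a
-- preallocated list in order, which appending reproduces exactly (for 0 ≤ n ≤ len a).
def pvPrefix (n : Int) (a : List Int) : List Int :=
  (PySem.List.pyRange 0 n 1).foldl
    (fun p i => p ++ [p.getD i.toNat 0 + PySem.List.pyGetD a i 0]) [0]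

-- one round of A's DP: new_dp[new_end] set for reachable end with good segment (end, new_end]
def pvStepA (g : Nat → Nat → Bool) (n : Nat) (dp : List Bool) : List Bool :=
  (List.range (n+1)).foldl (fun nd e =>
    if dp.getD e false then
      (List.range' (e+1) (n-e)).foldl (fun nd' t => if g e t then nd'.set t true else nd') nd
    else nd) (List.replicate (n+1) false)

def compute_max_beauty (n : Int) (k : Int) (a : List Int) : Int :=
  let pfx := pvPrefix n a
  ((List.range 61).reverse).foldl (fun result bit =>
    let mask := PySem.Int.bor result (2 ^ bit)      -- result | (1 << bit)
    -- (prefix[new_end] - prefix[end]) & mask == mask  (indices always in range 0..n)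
    let g := fun s t => (PySem.Int.band (pfx.getD t 0 - pfx.getD s 0) mask) == mask
    let dp := (PySem.List.pyRange 0 k 1).foldl (fun dp _ => pvStepA g n.toNat dp)
                ((List.replicate (n.toNat+1) false).set 0 true)
    if dp.getD n.toNat false then mask else result) 0

-- ===== PORT B =====
-- B's inner pass at position pos: collect {j+1 | start < pos good, j ∈ reach[start], j < k}
def pvCur (g : Nat → Nat → Bool) (k : Int) (reach : List (PySem.Set Int)) (pos : Nat) : PySem.Set Int :=
  (List.range pos).foldl (fun cur start =>
    if g start pos then
      (reach.getD start PySem.Set.empty).foldl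
        (fun c j => if j < k then PySem.Set.add c (j+1) else c) cur
    else cur) PySem.Set.empty

def compute_max_beauty_alt (n : Int) (k : Int) (a : List Int) : Int :=
  let pfx := pvPrefix n a
  ((List.range 61).reverse).foldl (fun result bit =>
    let mask := PySem.Int.bor result (2 ^ bit)
    let g := fun s t => (PySem.Int.band (pfx.getD t 0 - pfx.getD s 0) mask) == mask
    let reach := (List.range' 1 n.toNat).foldl
      (fun reach pos => reach ++ [pvCur g k reach pos]) [PySem.Set.ofList [0]]
    if PySem.Set.contains (reach.getD n.toNat PySem.Set.empty) k then mask else result) 0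

-- ===== PRECONDITION & SPEC =====
-- A raises IndexError exactly when n < 0 (dp[0] on an empty list) or n > len(a)
-- (a[i] in the prefix loop); Pre_ excludes exactly those crashes.
def Pre_compute_max_beauty (n : Int) (k : Int) (a : List Int) : Prop :=
  0 ≤ n ∧ n ≤ (a.length : Int)
instance (n : Int) (k : Int) (a : List Int) : Decidable (Pre_compute_max_beauty n k a) := by
  unfold Pre_compute_max_beauty; infer_instance

def pvWitness_compute_max_beauty : Int × Int × List Int := (2, 2, [3, 1])

-- On n = 0 with k < 0, A returns 2^61-1 (its untouched dp[0]=True survives zero DP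
-- rounds), while B returns 0, the intended answer: an empty shelf cannot be split
-- into a negative number of parts.
def D_compute_max_beauty (n : Int) (k : Int) (a : List Int) : Prop := n = 0 ∧ k < 0
instance (n : Int) (k : Int) (a : List Int) : Decidable (D_compute_max_beauty n k a) := by
  unfold D_compute_max_beauty; infer_instance

def Spec_compute_max_beauty (n : Int) (k : Int) (a : List Int) (out : Int) : Prop :=
  ¬ D_compute_max_beauty n k a → out = compute_max_beauty_alt n k a
instance (n : Int) (k : Int) (a : List Int) (out : Int) : Decidable (Spec_compute_max_beauty n k a out) := by
  unfold Spec_compute_max_beauty; infer_instance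

def pvDiffWitness_compute_max_beauty : Int × Int × List Int := (0, -1, [])
def pvDiffWitnessOut_compute_max_beauty : Int × Int := (2305843009213693951, 0)

-- ===== CLAIM (what is proved, stated in full; the proofs are below) =====
def Claim_unchanged_compute_max_beauty : Prop := ∀ (n : Int) (k : Int) (a : List Int), Dom_compute_max_beauty n k a → Pre_compute_max_beauty n k a → Spec_compute_max_beauty n k a (compute_max_beauty n k a)
def Claim_changed_compute_max_beauty : Prop := Dom_compute_max_beauty (pvDiffWitness_compute_max_beauty.1) (pvDiffWitness_compute_max_beauty.2.1) (pvDiffWitness_compute_max_beauty.2.2) ∧ Pre_compute_max_beauty (pvDiffWitness_compute_max_beauty.1) (pvDiffWitness_compute_max_beauty.2.1) (pvDiffWitness_compute_max_beauty.2.2) ∧ D_compute_max_beauty (pvDiffWitness_compute_max_beauty.1) (pvDiffWitness_compute_max_beauty.2.1) (pvDiffWitness_compute_max_beauty.2.2) ∧ compute_max_beauty (pvDiffWitness_compute_max_beauty.1) (pvDiffWitness_compute_max_beauty.2.1) (pvDiffWitness_compute_max_beauty.2.2) = pvDiffWitnessOut_compute_max_beauty.1 ∧ compute_max_beauty_alt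 (pvDiffWitness_compute_max_beauty.1) (pvDiffWitness_compute_max_beauty.2.1) (pvDiffWitness_compute_max_beauty.2.2) = pvDiffWitnessOut_compute_max_beauty.2 ∧ pvDiffWitnessOut_compute_max_beauty.1 ≠ pvDiffWitnessOut_compute_max_beauty.2
def Claim_exact_compute_max_beauty : Prop := ∀ (n : Int) (k : Int) (a : List Int), Dom_compute_max_beauty n k a → Pre_compute_max_beauty n k a → D_compute_max_beauty n k a → compute_max_beauty n k a ≠ compute_max_beauty_alt n k a

-- ===== LEMMAS AND PROOFS =====

def ReachB (g : Nat → Nat → Bool) : Nat → Nat → Bool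
  | 0, pos => pos == 0
  | j+1, pos => (List.range pos).any (fun s => ReachB g j s && g s pos)

theorem ReachB_zero_right (g : Nat → Nat → Bool) (j : Nat) : ReachB g j 0 = (j == 0) := by
  cases j <;> simp [ReachB]

-- ── A side ──

theorem innerA_length (p : Nat → Bool) (c s : Nat) (nd : List Bool) :
    ((List.range' s c).foldl (fun nd' u => if p u then nd'.set u true else nd') nd).length = nd.length := by
  induction c generalizing s nd with
  | zero => rfl
  | succ c ih =>
    rw [List.range'_succ, List.foldl_cons, ih]
    split <;> simp

theorem innerA_getD (p : Nat → Bool) (c s : Nat) (nd : List Bool) (t : Nat) :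
    (((List.range' s c).foldl (fun nd' u => if p u then nd'.set u true else nd') nd).getD t false = true)
      ↔ (nd.getD t false = true ∨ (s ≤ t ∧ t < s + c ∧ t < nd.length ∧ p t = true)) := by
  induction c generalizing s nd with
  | zero => simp; omega
  | succ c ih =>
    rw [List.range'_succ, List.foldl_cons]
    cases hp : p s
    · simp only [hp, Bool.false_eq_true, if_false]
      rw [ih]
      constructor
      · rintro (h | ⟨h1, h2, h3, h4⟩)
        · exact Or.inl h
        · exact Or.inr ⟨by omega, by omega, h3, h4⟩
      · rintro (h | ⟨h1, h2, h3, h4⟩)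
        · exact Or.inl h
        · have hne : s ≠ t := by
            intro e; rw [← e] at h4; rw [hp] at h4; exact Bool.false_ne_true h4
          exact Or.inr ⟨by omega, by omega, h3, h4⟩
    · simp only [hp, if_true]
      rw [ih, List.length_set]
      by_cases hst : t = s
      · subst hst
        by_cases hl : t < nd.length
        · have hg : (nd.set t true).getD t false = true := by simp [List.getD, hl]
          rw [hg]
          simp only [true_or, true_iff]
          exact Or.inr ⟨le_refl t, by omega, hl, hp⟩
        · rw [List.set_eq_of_length_le (by omega)]
          constructor
          · rintro (h | ⟨h1, _⟩)
            · exact Or.inl h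
            · omega
          · rintro (h | ⟨_, _, h3, _⟩)
            · exact Or.inl h
            · omega
      · have hne : s ≠ t := fun e => hst e.symm
        have hg : (nd.set s true).getD t false = nd.getD t false := by simp [List.getD, hne]
        rw [hg]
        constructor
        · rintro (h | ⟨h1, h2, h3, h4⟩)
          · exact Or.inl h
          · exact Or.inr ⟨by omega, by omega, h3, h4⟩
        · rintro (h | ⟨h1, h2, h3, h4⟩)
          · exact Or.inl h
          · exact Or.inr ⟨by omega, by omega, h3, h4⟩

theorem stepA_aux_getD (g : Nat → Nat → Bool) (n : Nat) (dp : List Bool) (t : Nat) (ht : t ≤ n)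
    (L : List Nat) (acc : List Bool) (hlen : acc.length = n + 1) :
    ((L.foldl (fun nd e =>
      if dp.getD e false then
        (List.range' (e+1) (n-e)).foldl (fun nd' t => if g e t then nd'.set t true else nd') nd
      else nd) acc).getD t false = true)
      ↔ (acc.getD t false = true ∨ ∃ e ∈ L, dp.getD e false = true ∧ e < t ∧ g e t = true) := by
  induction L generalizing acc with
  | nil => simp
  | cons e L ih =>
    rw [List.foldl_cons]
    by_cases hdp : dp.getD e false = true
    · rw [if_pos hdp]
      rw [ih _ (by rw [innerA_length]; exact hlen)]
      rw [innerA_getD]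
      constructor
      · rintro ((h | ⟨h1, h2, h3, h4⟩) | ⟨e', he', h1, h2, h3⟩)
        · exact Or.inl h
        · exact Or.inr ⟨e, by simp, hdp, by omega, h4⟩
        · exact Or.inr ⟨e', by simp [he'], h1, h2, h3⟩
      · rintro (h | ⟨e', he', h1, h2, h3⟩)
        · exact Or.inl (Or.inl h)
        · rcases List.mem_cons.mp he' with rfl | hmem
          · exact Or.inl (Or.inr ⟨by omega, by omega, by omega, h3⟩)
          · exact Or.inr ⟨e', hmem, h1, h2, h3⟩
    · rw [if_neg hdp]
      rw [ih _ hlen]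
      constructor
      · rintro (h | ⟨e', he', h1, h2, h3⟩)
        · exact Or.inl h
        · exact Or.inr ⟨e', by simp [he'], h1, h2, h3⟩
      · rintro (h | ⟨e', he', h1, h2, h3⟩)
        · exact Or.inl h
        · rcases List.mem_cons.mp he' with rfl | hmem
          · exact absurd h1 hdp
          · exact Or.inr ⟨e', hmem, h1, h2, h3⟩

theorem stepA_getD (g : Nat → Nat → Bool) (n : Nat) (dp : List Bool) (t : Nat) (ht : t ≤ n) :
    ((pvStepA g n dp).getD t false = true)
      ↔ ∃ e, e < t ∧ dp.getD e false = true ∧ g e t = true := by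
  unfold pvStepA
  rw [stepA_aux_getD g n dp t ht _ _ (by simp)]
  have hrep : (List.replicate (n+1) false).getD t false = false := by
    simp [List.getD, List.getElem?_replicate]; split <;> rfl
  rw [hrep]
  simp only [Bool.false_eq_true, false_or]
  constructor
  · rintro ⟨e, _, h1, h2, h3⟩; exact ⟨e, h2, h1, h3⟩
  · rintro ⟨e, h2, h1, h3⟩
    exact ⟨e, List.mem_range.mpr (by omega), h1, h2, h3⟩

theorem foldl_const_fun {α β : Type} (L : List α) (F : β → β) (d : β) :
    L.foldl (fun x _ => F x) d = F^[L.length] d := by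
  induction L generalizing d with
  | nil => rfl
  | cons e L ih => rw [List.foldl_cons, ih, List.length_cons, Function.iterate_succ_apply]

theorem rounds_getD (g : Nat → Nat → Bool) (n : Nat) (r : Nat) (t : Nat) (ht : t ≤ n) :
    (((pvStepA g n)^[r] ((List.replicate (n+1) false).set 0 true)).getD t false) = ReachB g r t := by
  induction r generalizing t with
  | zero =>
    simp only [Function.iterate_zero, id_eq, ReachB]
    by_cases h0 : t = 0
    · subst h0; simp [List.getD]
    · have : ((List.replicate (n+1) false).set 0 true).getD t false = (List.replicate (n+1) false).getD t false := by
        simp [List.getD, (Ne.symm h0 : (0:Nat) ≠ t)]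
      rw [this]
      simp [List.getD, List.getElem?_replicate, h0]
      split <;> simpa using h0
  | succ r ih =>
    rw [Function.iterate_succ_apply']
    have hch := stepA_getD g n ((pvStepA g n)^[r] ((List.replicate (n+1) false).set 0 true)) t ht
    rw [Bool.eq_iff_iff, hch]
    simp only [ReachB, List.any_eq_true, List.mem_range, Bool.and_eq_true]
    constructor
    · rintro ⟨e, h1, h2, h3⟩
      exact ⟨e, h1, by rw [← ih e (by omega)]; exact h2, h3⟩
    · rintro ⟨e, h1, h2, h3⟩
      exact ⟨e, h1, by rw [ih e (by omega)]; exact h2, h3⟩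

theorem curInner_mem (k : Int) (L : List Int) (c : PySem.Set Int) (x : Int) :
    (x ∈ L.foldl (fun c j => if j < k then PySem.Set.add c (j+1) else c) c)
      ↔ (x ∈ c ∨ ∃ j ∈ L, j < k ∧ x = j + 1) := by
  induction L generalizing c with
  | nil => simp
  | cons j L ih =>
    rw [List.foldl_cons, ih]
    by_cases hj : j < k
    · rw [if_pos hj, PySem.Set.mem_add]
      constructor
      · rintro ((h | rfl) | ⟨j', hj', h1, h2⟩)
        · exact Or.inl h
        · exact Or.inr ⟨j, by simp, hj, rfl⟩
        · exact Or.inr ⟨j', by simp [hj'], h1, h2⟩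
      · rintro (h | ⟨j', hj', h1, h2⟩)
        · exact Or.inl (Or.inl h)
        · rcases List.mem_cons.mp hj' with rfl | hmem
          · exact Or.inl (Or.inr h2)
          · exact Or.inr ⟨j', hmem, h1, h2⟩
    · rw [if_neg hj]
      constructor
      · rintro (h | ⟨j', hj', h1, h2⟩)
        · exact Or.inl h
        · exact Or.inr ⟨j', by simp [hj'], h1, h2⟩
      · rintro (h | ⟨j', hj', h1, h2⟩)
        · exact Or.inl h
        · rcases List.mem_cons.mp hj' with rfl | hmem
          · exact absurd h1 hj
          · exact Or.inr ⟨j', hmem, h1, h2⟩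

theorem pvCur_aux_mem (g : Nat → Nat → Bool) (k : Int) (reach : List (PySem.Set Int)) (pos : Nat)
    (L : List Nat) (c : PySem.Set Int) (x : Int) :
    (x ∈ L.foldl (fun cur start =>
      if g start pos then
        (reach.getD start PySem.Set.empty).foldl
          (fun c j => if j < k then PySem.Set.add c (j+1) else c) cur
      else cur) c)
      ↔ (x ∈ c ∨ ∃ s ∈ L, g s pos = true ∧ ∃ j ∈ reach.getD s PySem.Set.empty, j < k ∧ x = j + 1) := by
  induction L generalizing c with
  | nil => simp
  | cons s L ih =>
    rw [List.foldl_cons]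
    by_cases hs : g s pos = true
    · rw [if_pos hs, ih, curInner_mem]
      constructor
      · rintro ((h | ⟨j, hj, h1, h2⟩) | ⟨s', hs', h1, h2⟩)
        · exact Or.inl h
        · exact Or.inr ⟨s, by simp, hs, j, hj, h1, h2⟩
        · exact Or.inr ⟨s', by simp [hs'], h1, h2⟩
      · rintro (h | ⟨s', hs', h1, h2⟩)
        · exact Or.inl (Or.inl h)
        · rcases List.mem_cons.mp hs' with rfl | hmem
          · exact Or.inl (Or.inr h2)
          · exact Or.inr ⟨s', hmem, h1, h2⟩
    · rw [if_neg hs, ih]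
      constructor
      · rintro (h | ⟨s', hs', h1, h2⟩)
        · exact Or.inl h
        · exact Or.inr ⟨s', by simp [hs'], h1, h2⟩
      · rintro (h | ⟨s', hs', h1, h2⟩)
        · exact Or.inl h
        · rcases List.mem_cons.mp hs' with rfl | hmem
          · exact absurd h1 hs
          · exact Or.inr ⟨s', hmem, h1, h2⟩

theorem pvCur_mem (g : Nat → Nat → Bool) (k : Int) (reach : List (PySem.Set Int)) (pos : Nat) (x : Int) :
    (x ∈ pvCur g k reach pos)
      ↔ ∃ s, s < pos ∧ g s pos = true ∧ ∃ j ∈ reach.getD s PySem.Set.empty, j < k ∧ x = j + 1 := by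
  unfold pvCur
  rw [pvCur_aux_mem]
  constructor
  · rintro (h | ⟨s, hs, h⟩)
    · exact absurd h (by simp [PySem.Set.empty])
    · exact ⟨s, List.mem_range.mp hs, h⟩
  · rintro ⟨s, hs, h⟩
    exact Or.inr ⟨s, List.mem_range.mpr hs, h⟩

def pvRL (g : Nat → Nat → Bool) (k : Int) : Nat → List (PySem.Set Int)
  | 0 => [PySem.Set.ofList [0]]
  | m+1 => pvRL g k m ++ [pvCur g k (pvRL g k m) (m+1)]

theorem pvRL_length (g : Nat → Nat → Bool) (k : Int) (m : Nat) : (pvRL g k m).length = m + 1 := by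
  induction m with
  | zero => rfl
  | succ m ih => simp [pvRL, ih]

theorem pvRL_eq_fold (g : Nat → Nat → Bool) (k : Int) (m : Nat) :
    (List.range' 1 m).foldl (fun reach pos => reach ++ [pvCur g k reach pos]) [PySem.Set.ofList [0]]
      = pvRL g k m := by
  induction m with
  | zero => rfl
  | succ m ih =>
    rw [List.range'_1_concat, List.foldl_append, ih]
    simp [pvRL, Nat.add_comm 1 m]

theorem pvRL_mem (g : Nat → Nat → Bool) (k : Int) (m : Nat) (pos : Nat) (hpos : pos ≤ m) (x : Int) :
    (x ∈ (pvRL g k m).getD pos PySem.Set.empty)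
      ↔ ((pos = 0 ∧ x = 0) ∨ (1 ≤ pos ∧ 1 ≤ x ∧ x ≤ k ∧ ReachB g x.toNat pos = true)) := by
  induction m generalizing pos x with
  | zero =>
    have h0 : pos = 0 := by omega
    subst h0
    rw [show (pvRL g k 0).getD 0 PySem.Set.empty = PySem.Set.ofList [0] from rfl]
    rw [PySem.Set.mem_ofList]
    simp
  | succ m ih =>
    by_cases hp : pos ≤ m
    · have hlt : pos < (pvRL g k m).length := by rw [pvRL_length]; omega
      rw [show pvRL g k (m+1) = pvRL g k m ++ [pvCur g k (pvRL g k m) (m+1)] from rfl,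
          List.getD_append _ _ _ _ hlt]
      exact ih pos hp x
    · have hp1 : pos = m + 1 := by omega
      subst hp1
      have hgd : (pvRL g k (m+1)).getD (m+1) PySem.Set.empty = pvCur g k (pvRL g k m) (m+1) := by
        rw [show pvRL g k (m+1) = pvRL g k m ++ [pvCur g k (pvRL g k m) (m+1)] from rfl]
        have : (pvRL g k m).length = m + 1 := pvRL_length g k m
        rw [List.getD, List.getElem?_append_right (by omega), this]
        simp
      rw [hgd, pvCur_mem]
      constructor
      · rintro ⟨s, hs, hgs, j, hj, hjk, rfl⟩
        rw [ih s (by omega)] at hj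
        rcases hj with ⟨rfl, rfl⟩ | ⟨h1, h2, h3, h4⟩
        · refine Or.inr ⟨by omega, by omega, by omega, ?_⟩
          show ReachB g (0+1:Int).toNat (m+1) = true
          rw [show ((0:Int)+1).toNat = 1 from rfl]
          simp only [ReachB, List.any_eq_true, List.mem_range, Bool.and_eq_true]
          exact ⟨0, by omega, by simp [ReachB], hgs⟩
        · refine Or.inr ⟨by omega, by omega, by omega, ?_⟩
          have htn : (j+1).toNat = j.toNat + 1 := by omega
          rw [htn]
          simp only [ReachB, List.any_eq_true, List.mem_range, Bool.and_eq_true]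
          exact ⟨s, by omega, h4, hgs⟩
      · rintro (⟨h0, _⟩ | ⟨h1, hx1, hxk, hR⟩)
        · omega
        · have htn : x.toNat = (x-1).toNat + 1 := by omega
          rw [htn] at hR
          simp only [ReachB, List.any_eq_true, List.mem_range, Bool.and_eq_true] at hR
          obtain ⟨s, hs, hRs, hgs⟩ := hR
          refine ⟨s, hs, hgs, x - 1, ?_, by omega, by omega⟩
          rw [ih s (by omega)]
          by_cases hs0 : s = 0
          · subst hs0
            rw [ReachB_zero_right] at hRs
            have : (x-1).toNat = 0 := by simpa using hRs
            exact Or.inl ⟨rfl, by omega⟩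
          · right
            refine ⟨by omega, ?_, by omega, hRs⟩
            by_contra hlt1
            have : (x-1).toNat = 0 := by omega
            rw [this] at hRs
            simp only [ReachB, beq_iff_eq] at hRs
            exact hs0 hRs

theorem cond_eq (g : Nat → Nat → Bool) (n k : Int) (hn : 0 ≤ n) (hD : ¬(n = 0 ∧ k < 0)) :
    ((PySem.List.pyRange 0 k 1).foldl (fun dp _ => pvStepA g n.toNat dp)
        ((List.replicate (n.toNat+1) false).set 0 true)).getD n.toNat false
      = PySem.Set.contains
          (((List.range' 1 n.toNat).foldl (fun reach pos => reach ++ [pvCur g k reach pos])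
              [PySem.Set.ofList [0]]).getD n.toNat PySem.Set.empty) k := by
  rw [foldl_const_fun, PySem.List.length_pyRange_one, pvRL_eq_fold]
  rw [show k - 0 = k from by ring]
  rw [Bool.eq_iff_iff, rounds_getD g n.toNat k.toNat n.toNat le_rfl, PySem.Set.contains_iff,
      pvRL_mem g k n.toNat n.toNat le_rfl k]
  by_cases h0 : n.toNat = 0
  · have hk : 0 ≤ k := by
      by_contra h
      exact hD ⟨by omega, by omega⟩
      -- 
    rw [h0, ReachB_zero_right]
    simp only [beq_iff_eq]
    constructor
    · intro h; exact Or.inl ⟨by trivial, by omega⟩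
    · rintro (⟨_, rfl⟩ | ⟨h1, _⟩)
      · rfl
      · omega
  · constructor
    · intro h
      have hk1 : 1 ≤ k := by
        by_contra hk
        have : k.toNat = 0 := by omega
        rw [this] at h
        simp only [ReachB, beq_iff_eq] at h
        exact h0 h
      exact Or.inr ⟨by omega, hk1, le_rfl, h⟩
    · rintro (⟨h, _⟩ | ⟨_, _, _, h⟩)
      · exact absurd h h0
      · exact h

theorem final_eq (n k : Int) (a : List Int) (hn : 0 ≤ n) (hD : ¬(n = 0 ∧ k < 0)) :
    compute_max_beauty n k a = compute_max_beauty_alt n k a := by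
  unfold compute_max_beauty compute_max_beauty_alt
  apply PySem.List.foldl_congr_mem
  intro result bit _
  simp only
  rw [cond_eq _ n k hn hD]

set_option maxRecDepth 8192 in
theorem A_on_diff (k : Int) (a : List Int) (hk : k < 0) :
    compute_max_beauty 0 k a = 2305843009213693951 := by
  unfold compute_max_beauty
  rw [PySem.List.pyRange_one_eq_nil (le_of_lt hk)]
  simp only [List.foldl_nil, Int.toNat_zero]
  norm_num [List.getD]
  decide

theorem B_on_diff (k : Int) (a : List Int) (hk : k < 0) :
    compute_max_beauty_alt 0 k a = 0 := by
  unfold compute_max_beauty_alt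
  rw [show (0:Int).toNat = 0 from rfl, show List.range' 1 0 = [] from rfl]
  simp only [List.foldl_nil]
  have hc : PySem.Set.contains (List.getD [PySem.Set.ofList [(0:Int)]] 0 PySem.Set.empty) k = false := by
    rw [show List.getD [PySem.Set.ofList [(0:Int)]] 0 PySem.Set.empty = PySem.Set.ofList [0] from rfl]
    rw [Bool.eq_false_iff]
    intro h
    have := (PySem.Set.contains_iff _ _).mp h
    rw [PySem.Set.mem_ofList] at this
    simp at this
    omega
  simp only [hc, Bool.false_eq_true, if_false]
  induction (List.range 61).reverse with
  | nil => rfl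
  | cons b L ih => rw [List.foldl_cons]; exact ih

-- ===== VERDICT (by name: the statement is the Claim_ definition above) =====
theorem compute_max_beauty_spec : Claim_unchanged_compute_max_beauty := by
  intro n k a _ hpre
  unfold Spec_compute_max_beauty D_compute_max_beauty
  intro hD
  exact final_eq n k a hpre.1 hD

set_option maxRecDepth 4096 in
theorem compute_max_beauty_changed : Claim_changed_compute_max_beauty := by
  unfold Claim_changed_compute_max_beauty
  decide

theorem compute_max_beauty_tight : Claim_exact_compute_max_beauty := by
  intro n k a _ _ hD
  obtain ⟨h0, hk⟩ := hD
  subst h0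
  rw [A_on_diff k a hk, B_on_diff k a hk]
  decide
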